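-- pv_equiv track=rewrite | github.com/superbunny38/2022-3CodingTestPrepTeam | Week6/상어 초등학교/류채은.py | get_max_likes
-- ===== SOURCE A (Python) =====
-- def find_adjacent(std_positions, cur_y, cur_x, find):
--     move = [[-1,0],[1,0],[0,-1],[0,1]]
--     found_pos = []
--     count = 0
--     for m in move:
--         if cur_y + m[0] > -1 and cur_y + m[0] < len(std_positions) and cur_x + m[1] > -1 and cur_x + m[1] < len(std_positions):
--             if std_positions[cur_y + m[0]][cur_x + m[1]] == find:
--                 found_pos.append((cur_y + m[0], cur_x + m[1]))
--                 count += 1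
--         else:
--             continue
--     if len(found_pos) == 0:
--         return False, [], 0
--     else:
--         return True, found_pos, count
--
-- def get_max_likes(empty_seats, std, likes, std_positions):
--     max_likes = 0
--     max_likes_pos = []
--     for seat in empty_seats:
--         seat_y, seat_x = seat[0], seat[1]
--         num_likes = 0
--         for like in likes:
--             boolean, pos, count = find_adjacent(std_positions, seat_y, seat_x, like)
--             if boolean == True:
--                 num_likes += 1
--         if num_likes > max_likes and num_likes > 0:
--             max_likes = num_likes
--             max_likes_pos = []
--             max_likes_pos.append((seat_y, seat_x))
--         elif num_likes == max_likes and num_likes > 0: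
--             max_likes_pos.append((seat_y, seat_x))
--     return max_likes_pos
-- ===== SOURCE B (Python) =====
-- def get_max_likes(empty_seats, std, likes, std_positions):
--     if not likes:
--         return []
--     n = len(std_positions)
--     # count likes once; each seat then reads its 4 neighbour cells once and sums the
--     # like-multiplicities of the DISTINCT neighbour values (A rescans likes per seat)
--     cnt = {}
--     for like in likes:
--         cnt[like] = cnt.get(like, 0) + 1
--     best = 0
--     result = []
--     for seat in empty_seats:
--         y, x = seat[0], seat[1]
--         seen = set()
--         c = 0
--         for ny, nx in ((y - 1, x), (y + 1, x), (y, x - 1), (y, x + 1)):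
--             if 0 <= ny < n and 0 <= nx < n:
--                 v = std_positions[ny][nx]
--                 if v not in seen:
--                     seen.add(v)
--                     c += cnt.get(v, 0)
--         if c > best:
--             best = c
--             result = [(y, x)]
--         elif c == best and c > 0:
--             result.append((y, x))
--     return result
-- ===== Notes on version B (the rewrite author's own statement) =====
-- stated objective: faster
-- what changed: A rescans the whole likes list for every empty seat, probing the 4 neighbour grid cells per liked student (find_adjacent); B counts likes into a dict once, then reads each seat's 4 neighbour cells once and sums the like-multiplicities of the distinct neighbour values.
import Mathlib
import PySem

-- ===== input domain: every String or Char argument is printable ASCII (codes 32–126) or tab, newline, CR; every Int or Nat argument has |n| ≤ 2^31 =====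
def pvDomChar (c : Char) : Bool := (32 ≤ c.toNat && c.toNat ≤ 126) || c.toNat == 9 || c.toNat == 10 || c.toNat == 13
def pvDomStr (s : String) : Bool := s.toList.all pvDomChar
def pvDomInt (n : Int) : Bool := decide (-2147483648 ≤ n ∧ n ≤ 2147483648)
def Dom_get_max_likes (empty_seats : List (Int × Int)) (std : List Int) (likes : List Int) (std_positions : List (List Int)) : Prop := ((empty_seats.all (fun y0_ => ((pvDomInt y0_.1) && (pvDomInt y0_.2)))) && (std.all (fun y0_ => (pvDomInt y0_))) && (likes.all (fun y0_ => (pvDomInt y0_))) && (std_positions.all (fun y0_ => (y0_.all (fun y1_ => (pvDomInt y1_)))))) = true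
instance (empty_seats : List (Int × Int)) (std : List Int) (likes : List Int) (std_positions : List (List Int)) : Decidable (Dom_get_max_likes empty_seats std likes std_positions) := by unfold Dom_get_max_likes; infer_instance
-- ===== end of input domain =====

-- B counts the likes list once into a dict and then reads each seat's 4 neighbour cells once,
-- summing the like-multiplicities of the distinct neighbour values — A instead rescans the whole
-- likes list (4 grid probes per liked student) for every seat (objective: faster).

-- ===== PORT A =====
-- cell access std_positions[y][x]: pyGetD with a default that Pre_ makes unreachable — the guard
-- keeps 0 ≤ y,x < len(std_positions) and Pre_ keeps every probed cell inside its row (where a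
-- probe would run past a short row, Python raises IndexError; those inputs are outside Pre_).
def find_adjacent (std_positions : List (List Int)) (cur_y : Int) (cur_x : Int) (find : Int) :
    Bool × List (Int × Int) × Int :=
  let move : List (Int × Int) := [(-1, 0), (1, 0), (0, -1), (0, 1)]
  -- the two nested ifs (bounds, then cell == find) share the fall-through 'else: continue'
  let r := move.foldl (fun (st : List (Int × Int) × Int) m =>
    if cur_y + m.1 > -1 ∧ cur_y + m.1 < (std_positions.length : Int) ∧
       cur_x + m.2 > -1 ∧ cur_x + m.2 < (std_positions.length : Int) ∧
       PySem.List.pyGetD (PySem.List.pyGetD std_positions (cur_y + m.1) []) (cur_x + m.2) 0 = find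
    then (st.1 ++ [(cur_y + m.1, cur_x + m.2)], st.2 + 1)
    else st) ([], 0)
  if r.1 = [] then (false, [], 0) else (true, r.1, r.2)

def get_max_likes (empty_seats : List (Int × Int)) (std : List Int) (likes : List Int) (std_positions : List (List Int)) : List (Int × Int) :=
  (empty_seats.foldl (fun (st : Int × List (Int × Int)) seat =>
    let num_likes : Int := likes.foldl (fun acc like =>
      if (find_adjacent std_positions seat.1 seat.2 like).1 = true then acc + 1 else acc) 0
    if num_likes > st.1 ∧ num_likes > 0 then (num_likes, [(seat.1, seat.2)])
    else if num_likes = st.1 ∧ num_likes > 0 then (st.1, st.2 ++ [(seat.1, seat.2)])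
    else st) ((0 : Int), ([] : List (Int × Int)))).2

-- ===== PORT B =====
-- same cell access as A (B probes exactly the in-bounds neighbour cells of each seat);
-- alt_seat_likes is Source B's inner 'seen/c' loop over the seat's 4 neighbour cells
def alt_seat_likes (cnt : PySem.Dict Int Int) (g : List (List Int)) (sy sx : Int) : Int :=
  (([(sy - 1, sx), (sy + 1, sx), (sy, sx - 1), (sy, sx + 1)] : List (Int × Int)).foldl
    (fun (sc : PySem.Set Int × Int) q =>
      if 0 ≤ q.1 ∧ q.1 < (g.length : Int) ∧ 0 ≤ q.2 ∧ q.2 < (g.length : Int) then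
        let v := PySem.List.pyGetD (PySem.List.pyGetD g q.1 []) q.2 0
        if sc.1.contains v then sc
        else (sc.1.add v, sc.2 + cnt.getD v 0)
      else sc) ((PySem.Set.empty : PySem.Set Int), (0 : Int))).2

def get_max_likes_alt (empty_seats : List (Int × Int)) (std : List Int) (likes : List Int) (std_positions : List (List Int)) : List (Int × Int) :=
  if likes = [] then []
  else
    -- cnt = {}; for like in likes: cnt[like] = cnt.get(like, 0) + 1
    let cnt : PySem.Dict Int Int :=
      likes.foldl (fun d like => d.insert like (d.getD like 0 + 1)) PySem.Dict.empty
    (empty_seats.foldl (fun (st : Int × List (Int × Int)) seat =>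
      -- seen = set(); c = 0; for (ny, nx) in 4 neighbours: if in bounds and value unseen, c += cnt.get(v, 0)
      let c := alt_seat_likes cnt std_positions seat.1 seat.2
      if c > st.1 then (c, [(seat.1, seat.2)])
      else if c = st.1 ∧ c > 0 then (st.1, st.2 ++ [(seat.1, seat.2)])
      else st) ((0 : Int), ([] : List (Int × Int)))).2

-- ===== PRECONDITION & SPEC =====
-- Pre_ excludes exactly the inputs on which A raises IndexError: likes is non-empty and some empty
-- seat has an in-bounds neighbour cell lying past the end of a short grid row (B's probes hit the
-- same cells, so B raises there too).
def Pre_get_max_likes (empty_seats : List (Int × Int)) (std : List Int) (likes : List Int) (std_positions : List (List Int)) : Prop :=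
  likes = [] ∨ ∀ s ∈ empty_seats, ∀ m ∈ ([(-1, 0), (1, 0), (0, -1), (0, 1)] : List (Int × Int)),
    (s.1 + m.1 > -1 ∧ s.1 + m.1 < (std_positions.length : Int) ∧
     s.2 + m.2 > -1 ∧ s.2 + m.2 < (std_positions.length : Int)) →
    s.2 + m.2 < ((PySem.List.pyGetD std_positions (s.1 + m.1) []).length : Int)
instance (empty_seats : List (Int × Int)) (std : List Int) (likes : List Int) (std_positions : List (List Int)) : Decidable (Pre_get_max_likes empty_seats std likes std_positions) := by unfold Pre_get_max_likes; infer_instance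

def pvWitness_get_max_likes : (List (Int × Int)) × List Int × List Int × List (List Int) :=
  ([(0, 1), (1, 0)], [1, 2, 3, 4], [3, 4], [[0, 3], [4, 0]])

def Spec_get_max_likes (empty_seats : List (Int × Int)) (std : List Int) (likes : List Int) (std_positions : List (List Int)) (out : List (Int × Int)) : Prop := out = get_max_likes_alt empty_seats std likes std_positions
instance (empty_seats : List (Int × Int)) (std : List Int) (likes : List Int) (std_positions : List (List Int)) (out : List (Int × Int)) : Decidable (Spec_get_max_likes empty_seats std likes std_positions out) := by unfold Spec_get_max_likes; infer_instance

-- ===== CLAIM (what is proved, stated in full; the proofs are below) =====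
def Claim_equal_get_max_likes : Prop := ∀ (empty_seats : List (Int × Int)) (std : List Int) (likes : List Int) (std_positions : List (List Int)), Dom_get_max_likes empty_seats std likes std_positions → Pre_get_max_likes empty_seats std likes std_positions → Spec_get_max_likes empty_seats std likes std_positions (get_max_likes empty_seats std likes std_positions)

-- ===== LEMMAS AND PROOFS =====

-- a grid cell read, as both ports perform it
def pvCell (g : List (List Int)) (y x : Int) : Int :=
  PySem.List.pyGetD (PySem.List.pyGetD g y []) x 0

-- the values of a seat's in-bounds neighbour cells, in probe order
def pvW (g : List (List Int)) (cs : List (Int × Int)) : List Int :=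
  (cs.filter (fun q => decide (0 ≤ q.1 ∧ q.1 < (g.length : Int) ∧
      0 ≤ q.2 ∧ q.2 < (g.length : Int)))).map (fun q => pvCell g q.1 q.2)

-- the append-flag loop of find_adjacent, characterised for an arbitrary move list
theorem pv_fold_flag {α : Type} (mv : List α) (C : α → Prop) [DecidablePred C] (cf : α → Int × Int) :
    ((if (mv.foldl (fun (st : List (Int × Int) × Int) m =>
        if C m then (st.1 ++ [cf m], st.2 + 1) else st) ([], 0)).1 = []
      then false else true) = true) ↔ ∃ m ∈ mv, C m := by
  have hstep : (fun (st : List (Int × Int) × Int) (m : α) =>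
      if C m then (st.1 ++ [cf m], st.2 + 1) else st) =
      (fun st m => (if C m then st.1 ++ [cf m] else st.1,
                    if C m then st.2 + 1 else st.2)) := by
    funext st m
    by_cases h : C m <;> simp [h]
  rw [hstep, PySem.List.foldl_prod_mk
      (f := fun acc m => if C m then acc ++ [cf m] else acc)
      (g := fun acc m => if C m then acc + 1 else acc)]
  rw [PySem.List.foldl_append_ite (p := C) (f := cf)]
  simp only [List.nil_append]
  by_cases h : ∃ m ∈ mv, C m
  · obtain ⟨m, hm, hcm⟩ := h
    have hne : (mv.filter (fun m => decide (C m))).map cf ≠ [] := by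
      simp only [ne_eq, List.map_eq_nil_iff, List.filter_eq_nil_iff]
      push Not
      exact ⟨m, hm, by simpa using hcm⟩
    rw [if_neg hne]
    simpa using ⟨m, hm, hcm⟩
  · have hnil : (mv.filter (fun m => decide (C m))).map cf = [] := by
      simp only [List.map_eq_nil_iff, List.filter_eq_nil_iff]
      intro m hm
      simp only [decide_eq_true_eq]
      exact fun hc => h ⟨m, hm, hc⟩
    rw [if_pos hnil]
    simpa using h

-- find_adjacent's boolean flag, characterised
theorem pv_find_adjacent_iff (g : List (List Int)) (sy sx v : Int) :
    (find_adjacent g sy sx v).1 = true ↔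
      ∃ m ∈ ([(-1, 0), (1, 0), (0, -1), (0, 1)] : List (Int × Int)),
        sy + m.1 > -1 ∧ sy + m.1 < (g.length : Int) ∧ sx + m.2 > -1 ∧ sx + m.2 < (g.length : Int) ∧
        pvCell g (sy + m.1) (sx + m.2) = v := by
  have h0 : (find_adjacent g sy sx v).1 =
      (if (([(-1, 0), (1, 0), (0, -1), (0, 1)] : List (Int × Int)).foldl
          (fun (st : List (Int × Int) × Int) m =>
            if sy + m.1 > -1 ∧ sy + m.1 < (g.length : Int) ∧
               sx + m.2 > -1 ∧ sx + m.2 < (g.length : Int) ∧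
               PySem.List.pyGetD (PySem.List.pyGetD g (sy + m.1) []) (sx + m.2) 0 = v
            then (st.1 ++ [(sy + m.1, sx + m.2)], st.2 + 1)
            else st) ([], 0)).1 = []
       then false else true) := by
    show (if _ then ((false : Bool), ([] : List (Int × Int)), (0 : Int)) else _).1 = _
    rw [apply_ite Prod.fst]
  rw [h0]
  exact pv_fold_flag ([(-1, 0), (1, 0), (0, -1), (0, 1)] : List (Int × Int))
    (C := fun (m : Int × Int) => sy + m.1 > -1 ∧ sy + m.1 < (g.length : Int) ∧
      sx + m.2 > -1 ∧ sx + m.2 < (g.length : Int) ∧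
      PySem.List.pyGetD (PySem.List.pyGetD g (sy + m.1) []) (sx + m.2) 0 = v)
    (cf := fun (m : Int × Int) => (sy + m.1, sx + m.2))

-- the seen/c loop of B: it adds each distinct unseen in-bounds neighbour value's like-count once
theorem pv_inner_eq (g : List (List Int)) (likes : List Int)
    (cnt : PySem.Dict Int Int) (hcnt : ∀ v, cnt.getD v 0 = (likes.count v : Int)) :
    ∀ (cs : List (Int × Int)) (seen : PySem.Set Int) (c : Int),
      (cs.foldl (fun (sc : PySem.Set Int × Int) q =>
        if 0 ≤ q.1 ∧ q.1 < (g.length : Int) ∧ 0 ≤ q.2 ∧ q.2 < (g.length : Int) then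
          let v := PySem.List.pyGetD (PySem.List.pyGetD g q.1 []) q.2 0
          if sc.1.contains v then sc
          else (sc.1.add v, sc.2 + cnt.getD v 0)
        else sc) (seen, c)).2 =
      c + (likes.map (fun like =>
        if like ∈ pvW g cs ∧ like ∉ seen then (1 : Int) else 0)).sum := by
  intro cs
  induction cs with
  | nil =>
    intro seen c
    simp [pvW]
  | cons q t ih =>
    intro seen c
    rw [List.foldl_cons]
    by_cases hb : 0 ≤ q.1 ∧ q.1 < (g.length : Int) ∧ 0 ≤ q.2 ∧ q.2 < (g.length : Int)
    · rw [if_pos hb]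
      have hW : pvW g (q :: t) = pvCell g q.1 q.2 :: pvW g t := by
        simp [pvW, List.filter_cons, hb]
      set v := PySem.List.pyGetD (PySem.List.pyGetD g q.1 []) q.2 0 with hv
      have hvc : pvCell g q.1 q.2 = v := rfl
      by_cases hs : v ∈ seen
      · rw [if_pos (by simpa [PySem.Set.contains_iff] using hs)]
        rw [ih seen c, hW, hvc]
        congr 1
        apply congrArg
        apply List.map_congr_left
        intro like _
        by_cases hlv : like = v
        · subst hlv
          simp [hs]
        · simp [List.mem_cons, hlv]
      · rw [if_neg (by simpa [PySem.Set.contains_iff] using hs)]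
        rw [ih (seen.add v) (c + cnt.getD v 0), hW, hvc, hcnt v]
        have hpt : ∀ like ∈ likes,
            (if like ∈ v :: pvW g t ∧ like ∉ seen then (1 : Int) else 0) =
            (if like = v then (1 : Int) else 0) +
              (if like ∈ pvW g t ∧ like ∉ seen.add v then (1 : Int) else 0) := by
          intro like _
          by_cases hlv : like = v
          · subst hlv
            simp [hs, PySem.Set.mem_add]
          · simp only [List.mem_cons, PySem.Set.mem_add]
            by_cases hm1 : like ∈ pvW g t <;> by_cases hm2 : like ∈ seen <;>
              simp [hlv, hm1, hm2]
        rw [List.map_congr_left hpt, PySem.List.sum_map_add_int]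
        have hcount : (likes.map (fun like => if like = v then (1 : Int) else 0)).sum =
            (likes.count v : Int) := by
          have := PySem.List.sum_map_ite_one_zero (fun like => like == v) likes
          simpa [List.count_eq_countP] using this
        rw [hcount]
        ring
    · rw [if_neg hb]
      rw [ih seen c]
      have hW : pvW g (q :: t) = pvW g t := by
        simp [pvW, List.filter_cons, hb]
      rw [hW]

-- per seat and per like: A's adjacency flag says exactly 'like is an in-bounds neighbour value'
theorem pv_flag_iff_mem (g : List (List Int)) (sy sx like : Int) :
    (find_adjacent g sy sx like).1 = true ↔
      like ∈ pvW g [(sy - 1, sx), (sy + 1, sx), (sy, sx - 1), (sy, sx + 1)] := by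
  rw [pv_find_adjacent_iff]
  have hmem : like ∈ pvW g [(sy - 1, sx), (sy + 1, sx), (sy, sx - 1), (sy, sx + 1)] ↔
      ∃ q ∈ ([(sy - 1, sx), (sy + 1, sx), (sy, sx - 1), (sy, sx + 1)] : List (Int × Int)),
        (0 ≤ q.1 ∧ q.1 < (g.length : Int) ∧ 0 ≤ q.2 ∧ q.2 < (g.length : Int)) ∧
        pvCell g q.1 q.2 = like := by
    simp only [pvW, List.mem_map, List.mem_filter, decide_eq_true_eq]
    constructor
    · rintro ⟨q, ⟨hq, hbq⟩, hcq⟩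
      exact ⟨q, hq, hbq, hcq⟩
    · rintro ⟨q, hq, hbq, hcq⟩
      exact ⟨q, ⟨hq, hbq⟩, hcq⟩
  rw [hmem]
  constructor
  · rintro ⟨m, hm, h1, h2, h3, h4, h5⟩
    simp only [List.mem_cons, List.not_mem_nil, or_false] at hm
    rcases hm with rfl | rfl | rfl | rfl
    · exact ⟨(sy - 1, sx), by simp, ⟨by omega, by omega, by omega, by omega⟩,
        by rw [show sy - 1 = sy + (-1) by ring, show sx = sx + 0 by ring]; exact h5⟩
    · exact ⟨(sy + 1, sx), by simp, ⟨by omega, by omega, by omega, by omega⟩,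
        by rw [show sx = sx + 0 by ring]; exact h5⟩
    · exact ⟨(sy, sx - 1), by simp, ⟨by omega, by omega, by omega, by omega⟩,
        by rw [show sy = sy + 0 by ring, show sx - 1 = sx + (-1) by ring]; exact h5⟩
    · exact ⟨(sy, sx + 1), by simp, ⟨by omega, by omega, by omega, by omega⟩,
        by rw [show sy = sy + 0 by ring]; exact h5⟩
  · rintro ⟨q, hq, ⟨hb1, hb2, hb3, hb4⟩, hcq⟩
    simp only [List.mem_cons, List.not_mem_nil, or_false] at hq
    rcases hq with rfl | rfl | rfl | rfl
    · exact ⟨(-1, 0), by simp, by omega, by omega, by omega, by omega,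
        by rw [show sy + (-1) = sy - 1 by ring, show sx + (0 : Int) = sx by ring]; exact hcq⟩
    · exact ⟨(1, 0), by simp, by omega, by omega, by omega, by omega,
        by rw [show sx + (0 : Int) = sx by ring]; exact hcq⟩
    · exact ⟨(0, -1), by simp, by omega, by omega, by omega, by omega,
        by rw [show sy + (0 : Int) = sy by ring, show sx + (-1) = sx - 1 by ring]; exact hcq⟩
    · exact ⟨(0, 1), by simp, by omega, by omega, by omega, by omega,
        by rw [show sy + (0 : Int) = sy by ring]; exact hcq⟩

-- per seat: A's num_likes equals B's distinct-neighbour-value sum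
theorem pv_num_eq (g : List (List Int)) (likes : List Int)
    (cnt : PySem.Dict Int Int) (hcnt : ∀ v, cnt.getD v 0 = (likes.count v : Int)) (sy sx : Int) :
    likes.foldl (fun acc like =>
        if (find_adjacent g sy sx like).1 = true then acc + 1 else acc) 0 =
      alt_seat_likes cnt g sy sx := by
  rw [alt_seat_likes, pv_inner_eq g likes cnt hcnt]
  have hpt : ∀ like ∈ likes,
      (if like ∈ pvW g [(sy - 1, sx), (sy + 1, sx), (sy, sx - 1), (sy, sx + 1)] ∧
          like ∉ (PySem.Set.empty : PySem.Set Int) then (1 : Int) else 0) =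
      (if (find_adjacent g sy sx like).1 = true then (1 : Int) else 0) := by
    intro like _
    have hio := pv_flag_iff_mem g sy sx like
    by_cases hf : (find_adjacent g sy sx like).1 = true
    · simp [hf, hio.mp hf, PySem.Set.empty]
    · have hnm : like ∉ pvW g [(sy - 1, sx), (sy + 1, sx), (sy, sx - 1), (sy, sx + 1)] :=
        fun hmem => hf (hio.mpr hmem)
      simp [hf, hnm]
  rw [List.map_congr_left hpt,
      PySem.List.sum_map_ite_one_zero (fun like => (find_adjacent g sy sx like).1) likes,
      PySem.List.foldl_ite_add_one
        (p := fun like => (find_adjacent g sy sx like).1 = true) likes 0]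
  simp

-- the two selection folds agree once the per-seat counts agree
theorem pv_select_eq (numA numB : Int × Int → Int) (h : ∀ s, numA s = numB s) :
    ∀ (seats : List (Int × Int)) (st : Int × List (Int × Int)), 0 ≤ st.1 →
      seats.foldl (fun st seat =>
        if numA seat > st.1 ∧ numA seat > 0 then (numA seat, [(seat.1, seat.2)])
        else if numA seat = st.1 ∧ numA seat > 0 then (st.1, st.2 ++ [(seat.1, seat.2)])
        else st) st =
      seats.foldl (fun st seat =>
        if numB seat > st.1 then (numB seat, [(seat.1, seat.2)])
        else if numB seat = st.1 ∧ numB seat > 0 then (st.1, st.2 ++ [(seat.1, seat.2)])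
        else st) st := by
  intro seats
  induction seats with
  | nil => intro st _; rfl
  | cons s t ih =>
    intro st hst
    rw [List.foldl_cons, List.foldl_cons, h s]
    by_cases h1 : numB s > st.1
    · rw [if_pos ⟨h1, by omega⟩, if_pos h1]
      exact ih _ (by simp; omega)
    · rw [if_neg (by omega), if_neg h1]
      by_cases h2 : numB s = st.1 ∧ numB s > 0
      · rw [if_pos h2]
        exact ih _ (by simpa using hst)
      · rw [if_neg h2]
        exact ih _ hst

-- with no likes, A's selection loop never fires
theorem pv_a_empty (g : List (List Int)) :
    ∀ (seats : List (Int × Int)),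
      (seats.foldl (fun (st : Int × List (Int × Int)) seat =>
        let num_likes : Int := ([] : List Int).foldl (fun acc like =>
          if (find_adjacent g seat.1 seat.2 like).1 = true then acc + 1 else acc) 0
        if num_likes > st.1 ∧ num_likes > 0 then (num_likes, [(seat.1, seat.2)])
        else if num_likes = st.1 ∧ num_likes > 0 then (st.1, st.2 ++ [(seat.1, seat.2)])
        else st) ((0 : Int), ([] : List (Int × Int)))) = ((0 : Int), ([] : List (Int × Int))) := by
  intro seats
  induction seats with
  | nil => rfl
  | cons s t ih =>
    rw [List.foldl_cons]
    simpa using ih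

-- ===== VERDICT (by name: the statement is the Claim_ definition above) =====
theorem get_max_likes_spec : Claim_equal_get_max_likes := by
  intro empty_seats std likes std_positions _ _
  unfold Spec_get_max_likes
  by_cases hl : likes = []
  · subst hl
    rw [get_max_likes_alt, if_pos rfl, get_max_likes, pv_a_empty std_positions empty_seats]
  · rw [get_max_likes_alt, if_neg hl]
    have hcnt : ∀ v, (likes.foldl (fun d like => d.insert like (d.getD like 0 + 1))
        PySem.Dict.empty).getD v 0 = (likes.count v : Int) := by
      intro v
      rw [PySem.Dict.foldl_insert_getD_add_one_eq_counter, PySem.Dict.getD_counter]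
    exact congrArg Prod.snd
      (pv_select_eq
        (fun s => likes.foldl (fun acc like =>
          if (find_adjacent std_positions s.1 s.2 like).1 = true then acc + 1 else acc) 0)
        (fun s => alt_seat_likes (likes.foldl (fun d like =>
          d.insert like (d.getD like 0 + 1)) PySem.Dict.empty) std_positions s.1 s.2)
        (fun s => pv_num_eq std_positions likes _ hcnt s.1 s.2)
        empty_seats ((0 : Int), ([] : List (Int × Int))) (by simp))
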